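-- pv_equiv track=rewrite | github.com/BCABC4353/835 | parser_835.py | extract_dtm_values
-- ===== SOURCE A (Python) =====
-- def extract_dtm_values(dtm_list):
--     """
--     Extract date values from DTM segments.
--     If multiple DTM segments with same qualifier exist, prefer the FIRST one
--     (it's closer to the claim/service in hierarchical order).
--
--     FIXED: Properly separate claim-level and service-level dates per X12 spec:
--     - DTM*232/233 are CLAIM-level service dates (Loop 2100)
--     - DTM*150/151/472 are SERVICE-level dates (Loop 2110)
--
--     Args:
--         dtm_list: List of DTM segments
--     """
--     dtm_values = {
--         'service_start': '',  # For CLAIM: DTM*232, For SERVICE: DTM*150/472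
--         'service_end': '',    # For CLAIM: DTM*233, For SERVICE: DTM*151
--         'statement_start': '',
--         'statement_end': '',
--         'received_date': '',
--         'expiration_date': '',
--         # Additional DTM qualifiers
--         'process_date': '',           # 009
--         # Institutional-only dates - not used for professional claims
--         # 'discharge_date': '',         # 096
--         # 'admission_date': ''          # 435
--         'discharge_date': '',  # Keep for compatibility but empty for professional claims
--         'statement_from_date': '',    # 434
--         'admission_date': ''  # Keep for compatibility but empty for professional claims
--     }
--     dtm_050_count = 0
--     dtm_050_segments = []
--     for dtm in dtm_list:
--         qual = dtm.get('date_qualifier', '')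
--         val = dtm.get('date_value', '')
--
--         # CLAIM-LEVEL DATES (Loop 2100)
--         if qual == '232':  # Claim Statement Period Start
--             if not dtm_values['service_start']:
--                 dtm_values['service_start'] = val
--         elif qual == '233':  # Claim Statement Period End
--             if not dtm_values['service_end']:
--                 dtm_values['service_end'] = val
--
--         # SERVICE-LEVEL DATES (Loop 2110) - Should only appear in service context
--         # but we keep them here for backward compatibility
--         elif qual == '150':  # Service Period Start
--             if not dtm_values['service_start']:
--                 dtm_values['service_start'] = val
--         elif qual == '151':  # Service Period End
--             if not dtm_values['service_end']:
--                 dtm_values['service_end'] = val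
--         elif qual == '472':  # Service Date
--             if not dtm_values['service_start']:
--                 dtm_values['service_start'] = val
--
--         # OTHER CLAIM-LEVEL DATES
--         elif qual == '050':
--             dtm_050_count += 1
--             dtm_050_segments.append(f"DTM*050*{val}")
--             if not dtm_values['received_date']:
--                 dtm_values['received_date'] = val
--         elif qual == '036':
--             if not dtm_values['expiration_date']:
--                 dtm_values['expiration_date'] = val
--         elif qual == '009':
--             if not dtm_values['process_date']:
--                 dtm_values['process_date'] = val
--         elif qual == '096':
--             # Institutional discharge date - not used for professional claims
--             # if not dtm_values['discharge_date']:
--             #     dtm_values['discharge_date'] = val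
--             pass
--         elif qual == '434':
--             if not dtm_values['statement_start']:
--                 dtm_values['statement_start'] = val
--             if not dtm_values['statement_from_date']:
--                 dtm_values['statement_from_date'] = val
--         elif qual == '435':
--             if not dtm_values['statement_end']:
--                 dtm_values['statement_end'] = val
--             # Institutional admission date - not used for professional claims
--             # if not dtm_values['admission_date']:
--             #     dtm_values['admission_date'] = val
--     return dtm_values
-- ===== SOURCE B (Python) =====
-- # Per-field rewrite: each output field is computed by its own search for the first
-- # segment carrying a non-empty value under one of that field's qualifiers; this
-- # replaces A's single stateful pass (and its unused 050 bookkeeping) with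
-- # independent declarative queries.
--
-- def extract_dtm_values(dtm_list):
--     def first_date(quals):
--         """First non-empty date_value among segments whose qualifier is in quals."""
--         for dtm in dtm_list:
--             if dtm.get('date_qualifier', '') in quals and dtm.get('date_value', ''):
--                 return dtm.get('date_value', '')
--         return ''
--
--     statement = first_date(('434',))
--     return {
--         'service_start': first_date(('232', '150', '472')),
--         'service_end': first_date(('233', '151')),
--         'statement_start': statement,
--         'statement_end': first_date(('435',)),
--         'received_date': first_date(('050',)),
--         'expiration_date': first_date(('036',)),
--         'process_date': first_date(('009',)),
--         'discharge_date': '',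
--         'statement_from_date': statement,
--         'admission_date': '',
--     }
-- ===== Notes on version B (the rewrite author's own statement) =====
-- stated objective: alternative
-- what changed: Instead of A's single stateful pass that mutates a result dict per segment, B computes each output field independently as the first non-empty date_value among segments with that field's qualifiers (first-wins falls out of searching for the first non-empty match), dropping the 050 bookkeeping that never reaches the result.
import Mathlib
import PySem

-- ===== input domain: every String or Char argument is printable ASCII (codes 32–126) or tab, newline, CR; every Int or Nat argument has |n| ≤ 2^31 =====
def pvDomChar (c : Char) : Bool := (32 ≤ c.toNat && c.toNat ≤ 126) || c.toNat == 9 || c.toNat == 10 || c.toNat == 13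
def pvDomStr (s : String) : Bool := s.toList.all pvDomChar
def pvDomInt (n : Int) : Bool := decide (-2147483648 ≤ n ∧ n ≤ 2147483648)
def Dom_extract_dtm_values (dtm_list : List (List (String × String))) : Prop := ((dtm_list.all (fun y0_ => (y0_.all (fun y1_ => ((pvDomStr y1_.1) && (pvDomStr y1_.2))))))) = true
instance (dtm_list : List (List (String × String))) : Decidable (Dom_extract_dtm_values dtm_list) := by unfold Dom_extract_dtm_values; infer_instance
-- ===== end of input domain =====

-- B computes each output field by an independent search for the first non-empty value
-- under that field's qualifiers, instead of A's single stateful pass (alternative decomposition).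

-- shared transliteration of `dtm.get(k, '')` on the input dicts
def pvDget (dtm : List (String × String)) (k : String) : String :=
  (PySem.Dict.mk dtm).getD k ""

-- ===== PORT A =====
def pvInitA : PySem.Dict String String :=
  PySem.Dict.mk [("service_start", ""), ("service_end", ""), ("statement_start", ""),
    ("statement_end", ""), ("received_date", ""), ("expiration_date", ""),
    ("process_date", ""), ("discharge_date", ""), ("statement_from_date", ""),
    ("admission_date", "")]

-- one iteration of A's for-loop; state = (dtm_values, dtm_050_count, dtm_050_segments)
def pvStepA (st : PySem.Dict String String × Int × List String)
    (dtm : List (String × String)) : PySem.Dict String String × Int × List String :=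
  let d := st.1; let c := st.2.1; let segs := st.2.2
  let qual := pvDget dtm "date_qualifier"
  let val := pvDget dtm "date_value"
  if qual = "232" then
    ((if d.getD "service_start" "" = "" then d.insert "service_start" val else d), c, segs)
  else if qual = "233" then
    ((if d.getD "service_end" "" = "" then d.insert "service_end" val else d), c, segs)
  else if qual = "150" then
    ((if d.getD "service_start" "" = "" then d.insert "service_start" val else d), c, segs)
  else if qual = "151" then
    ((if d.getD "service_end" "" = "" then d.insert "service_end" val else d), c, segs)
  else if qual = "472" then
    ((if d.getD "service_start" "" = "" then d.insert "service_start" val else d), c, segs)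
  else if qual = "050" then
    ((if d.getD "received_date" "" = "" then d.insert "received_date" val else d),
      c + 1, segs ++ ["DTM*050*" ++ val])
  else if qual = "036" then
    ((if d.getD "expiration_date" "" = "" then d.insert "expiration_date" val else d), c, segs)
  else if qual = "009" then
    ((if d.getD "process_date" "" = "" then d.insert "process_date" val else d), c, segs)
  else if qual = "096" then
    (d, c, segs)
  else if qual = "434" then
    (letI d1 := if d.getD "statement_start" "" = "" then d.insert "statement_start" val else d
     ((if d1.getD "statement_from_date" "" = "" then d1.insert "statement_from_date" val else d1),
       c, segs))
  else if qual = "435" then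
    ((if d.getD "statement_end" "" = "" then d.insert "statement_end" val else d), c, segs)
  else
    (d, c, segs)

def extract_dtm_values (dtm_list : List (List (String × String))) : List (String × String) :=
  (dtm_list.foldl pvStepA (pvInitA, 0, [])).1.items

-- ===== PORT B =====
-- Source B's first_date: first non-empty date_value among segments whose qualifier is in quals
def pvFirstDate (dtm_list : List (List (String × String))) (quals : List String) : String :=
  match dtm_list with
  | [] => ""
  | dtm :: rest =>
    if pvDget dtm "date_qualifier" ∈ quals ∧ pvDget dtm "date_value" ≠ "" then
      pvDget dtm "date_value"
    else pvFirstDate rest quals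

def extract_dtm_values_alt (dtm_list : List (List (String × String))) : List (String × String) :=
  let statement := pvFirstDate dtm_list ["434"]
  (PySem.Dict.mk
    [("service_start", pvFirstDate dtm_list ["232", "150", "472"]),
     ("service_end", pvFirstDate dtm_list ["233", "151"]),
     ("statement_start", statement),
     ("statement_end", pvFirstDate dtm_list ["435"]),
     ("received_date", pvFirstDate dtm_list ["050"]),
     ("expiration_date", pvFirstDate dtm_list ["036"]),
     ("process_date", pvFirstDate dtm_list ["009"]),
     ("discharge_date", ""),
     ("statement_from_date", statement),
     ("admission_date", "")]).items

-- ===== PRECONDITION & SPEC =====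
def Spec_extract_dtm_values (dtm_list : List (List (String × String))) (out : List (String × String)) : Prop := out = extract_dtm_values_alt dtm_list
instance (dtm_list : List (List (String × String))) (out : List (String × String)) : Decidable (Spec_extract_dtm_values dtm_list out) := by unfold Spec_extract_dtm_values; infer_instance

-- ===== CLAIM =====
def Claim_equal_extract_dtm_values : Prop := ∀ (dtm_list : List (List (String × String))), Dom_extract_dtm_values dtm_list → Spec_extract_dtm_values dtm_list (extract_dtm_values dtm_list)

-- ===== LEMMAS AND PROOFS =====

-- A's dict state is always of this shape (all ten keys, two permanently empty)
def mkD (ss se sts ste rd ed pd sfd : String) : PySem.Dict String String :=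
  PySem.Dict.mk [("service_start", ss), ("service_end", se), ("statement_start", sts),
    ("statement_end", ste), ("received_date", rd), ("expiration_date", ed),
    ("process_date", pd), ("discharge_date", ""), ("statement_from_date", sfd),
    ("admission_date", "")]

-- first-wins overlay
def ov (a b : String) : String := if a = "" then b else a

theorem fd_cons_mem (dtm : List (String × String)) (rest : List (List (String × String)))
    (quals : List String) (h : pvDget dtm "date_qualifier" ∈ quals) :
    pvFirstDate (dtm :: rest) quals =
      if pvDget dtm "date_value" = "" then pvFirstDate rest quals
      else pvDget dtm "date_value" := by
  simp only [pvFirstDate, h, true_and]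
  by_cases hv : pvDget dtm "date_value" = "" <;> simp [hv]

theorem fd_cons_not_mem (dtm : List (String × String)) (rest : List (List (String × String)))
    (quals : List String) (h : pvDget dtm "date_qualifier" ∉ quals) :
    pvFirstDate (dtm :: rest) quals = pvFirstDate rest quals := by
  simp [pvFirstDate, h]

theorem ov_step (a v b : String) :
    ov (if a = "" then v else a) b = ov a (if v = "" then b else v) := by
  unfold ov; split_ifs <;> simp_all

-- A's first-wins assignment on the shaped dict, one lemma per assignable field
theorem upd_ss (ss se sts ste rd ed pd sfd v : String) :
    (if (mkD ss se sts ste rd ed pd sfd).getD "service_start" "" = "" then (mkD ss se sts ste rd ed pd sfd).insert "service_start" v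
     else mkD ss se sts ste rd ed pd sfd) = mkD (if ss = "" then v else ss) se sts ste rd ed pd sfd := by
  have hg : (mkD ss se sts ste rd ed pd sfd).getD "service_start" "" = ss := rfl
  have hi : (mkD ss se sts ste rd ed pd sfd).insert "service_start" v = mkD v se sts ste rd ed pd sfd := rfl
  rw [hg, hi]; split_ifs <;> rfl

theorem upd_se (ss se sts ste rd ed pd sfd v : String) :
    (if (mkD ss se sts ste rd ed pd sfd).getD "service_end" "" = "" then (mkD ss se sts ste rd ed pd sfd).insert "service_end" v
     else mkD ss se sts ste rd ed pd sfd) = mkD ss (if se = "" then v else se) sts ste rd ed pd sfd := by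
  have hg : (mkD ss se sts ste rd ed pd sfd).getD "service_end" "" = se := rfl
  have hi : (mkD ss se sts ste rd ed pd sfd).insert "service_end" v = mkD ss v sts ste rd ed pd sfd := rfl
  rw [hg, hi]; split_ifs <;> rfl

theorem upd_sts (ss se sts ste rd ed pd sfd v : String) :
    (if (mkD ss se sts ste rd ed pd sfd).getD "statement_start" "" = "" then (mkD ss se sts ste rd ed pd sfd).insert "statement_start" v
     else mkD ss se sts ste rd ed pd sfd) = mkD ss se (if sts = "" then v else sts) ste rd ed pd sfd := by
  have hg : (mkD ss se sts ste rd ed pd sfd).getD "statement_start" "" = sts := rfl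
  have hi : (mkD ss se sts ste rd ed pd sfd).insert "statement_start" v = mkD ss se v ste rd ed pd sfd := rfl
  rw [hg, hi]; split_ifs <;> rfl

theorem upd_ste (ss se sts ste rd ed pd sfd v : String) :
    (if (mkD ss se sts ste rd ed pd sfd).getD "statement_end" "" = "" then (mkD ss se sts ste rd ed pd sfd).insert "statement_end" v
     else mkD ss se sts ste rd ed pd sfd) = mkD ss se sts (if ste = "" then v else ste) rd ed pd sfd := by
  have hg : (mkD ss se sts ste rd ed pd sfd).getD "statement_end" "" = ste := rfl
  have hi : (mkD ss se sts ste rd ed pd sfd).insert "statement_end" v = mkD ss se sts v rd ed pd sfd := rfl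
  rw [hg, hi]; split_ifs <;> rfl

theorem upd_rd (ss se sts ste rd ed pd sfd v : String) :
    (if (mkD ss se sts ste rd ed pd sfd).getD "received_date" "" = "" then (mkD ss se sts ste rd ed pd sfd).insert "received_date" v
     else mkD ss se sts ste rd ed pd sfd) = mkD ss se sts ste (if rd = "" then v else rd) ed pd sfd := by
  have hg : (mkD ss se sts ste rd ed pd sfd).getD "received_date" "" = rd := rfl
  have hi : (mkD ss se sts ste rd ed pd sfd).insert "received_date" v = mkD ss se sts ste v ed pd sfd := rfl
  rw [hg, hi]; split_ifs <;> rfl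

theorem upd_ed (ss se sts ste rd ed pd sfd v : String) :
    (if (mkD ss se sts ste rd ed pd sfd).getD "expiration_date" "" = "" then (mkD ss se sts ste rd ed pd sfd).insert "expiration_date" v
     else mkD ss se sts ste rd ed pd sfd) = mkD ss se sts ste rd (if ed = "" then v else ed) pd sfd := by
  have hg : (mkD ss se sts ste rd ed pd sfd).getD "expiration_date" "" = ed := rfl
  have hi : (mkD ss se sts ste rd ed pd sfd).insert "expiration_date" v = mkD ss se sts ste rd v pd sfd := rfl
  rw [hg, hi]; split_ifs <;> rfl

theorem upd_pd (ss se sts ste rd ed pd sfd v : String) :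
    (if (mkD ss se sts ste rd ed pd sfd).getD "process_date" "" = "" then (mkD ss se sts ste rd ed pd sfd).insert "process_date" v
     else mkD ss se sts ste rd ed pd sfd) = mkD ss se sts ste rd ed (if pd = "" then v else pd) sfd := by
  have hg : (mkD ss se sts ste rd ed pd sfd).getD "process_date" "" = pd := rfl
  have hi : (mkD ss se sts ste rd ed pd sfd).insert "process_date" v = mkD ss se sts ste rd ed v sfd := rfl
  rw [hg, hi]; split_ifs <;> rfl

theorem upd_sfd (ss se sts ste rd ed pd sfd v : String) :
    (if (mkD ss se sts ste rd ed pd sfd).getD "statement_from_date" "" = "" then (mkD ss se sts ste rd ed pd sfd).insert "statement_from_date" v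
     else mkD ss se sts ste rd ed pd sfd) = mkD ss se sts ste rd ed pd (if sfd = "" then v else sfd) := by
  have hg : (mkD ss se sts ste rd ed pd sfd).getD "statement_from_date" "" = sfd := rfl
  have hi : (mkD ss se sts ste rd ed pd sfd).insert "statement_from_date" v = mkD ss se sts ste rd ed pd v := rfl
  rw [hg, hi]; split_ifs <;> rfl

theorem pvMain (l : List (List (String × String))) (ss se sts ste rd ed pd sfd : String)
    (c : Int) (segs : List String) :
    (l.foldl pvStepA (mkD ss se sts ste rd ed pd sfd, c, segs)).1 =
      mkD (ov ss (pvFirstDate l ["232", "150", "472"]))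
          (ov se (pvFirstDate l ["233", "151"]))
          (ov sts (pvFirstDate l ["434"]))
          (ov ste (pvFirstDate l ["435"]))
          (ov rd (pvFirstDate l ["050"]))
          (ov ed (pvFirstDate l ["036"]))
          (ov pd (pvFirstDate l ["009"]))
          (ov sfd (pvFirstDate l ["434"])) := by
  induction l generalizing ss se sts ste rd ed pd sfd c segs with
  | nil => simp only [List.foldl_nil, pvFirstDate, ov]; split_ifs <;> simp_all
  | cons dtm rest ih =>
    rw [List.foldl_cons]
    by_cases h1 : pvDget dtm "date_qualifier" = "232"
    · rw [show pvStepA (mkD ss se sts ste rd ed pd sfd, c, segs) dtm =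
         (mkD (if ss = "" then pvDget dtm "date_value" else ss) se sts ste rd ed pd sfd, c, segs) from by
           show (if pvDget dtm "date_qualifier" = "232" then _ else _) = _
           rw [if_pos h1]
           rw [upd_ss]
           ]
      rw [ih]
      rw [fd_cons_mem dtm rest ["232", "150", "472"] (by simp [h1]),
        fd_cons_not_mem dtm rest ["233", "151"] (by simp [h1]),
        fd_cons_not_mem dtm rest ["434"] (by simp [h1]),
        fd_cons_not_mem dtm rest ["435"] (by simp [h1]),
        fd_cons_not_mem dtm rest ["050"] (by simp [h1]),
        fd_cons_not_mem dtm rest ["036"] (by simp [h1]),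
        fd_cons_not_mem dtm rest ["009"] (by simp [h1])]
      rw [ov_step]
    by_cases h2 : pvDget dtm "date_qualifier" = "233"
    · rw [show pvStepA (mkD ss se sts ste rd ed pd sfd, c, segs) dtm =
         (mkD ss (if se = "" then pvDget dtm "date_value" else se) sts ste rd ed pd sfd, c, segs) from by
           show (if pvDget dtm "date_qualifier" = "232" then _ else _) = _
           rw [if_neg h1, if_pos h2]
           rw [upd_se]
           ]
      rw [ih]
      rw [fd_cons_not_mem dtm rest ["232", "150", "472"] (by simp [h2]),
        fd_cons_mem dtm rest ["233", "151"] (by simp [h2]),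
        fd_cons_not_mem dtm rest ["434"] (by simp [h2]),
        fd_cons_not_mem dtm rest ["435"] (by simp [h2]),
        fd_cons_not_mem dtm rest ["050"] (by simp [h2]),
        fd_cons_not_mem dtm rest ["036"] (by simp [h2]),
        fd_cons_not_mem dtm rest ["009"] (by simp [h2])]
      rw [ov_step]
    by_cases h3 : pvDget dtm "date_qualifier" = "150"
    · rw [show pvStepA (mkD ss se sts ste rd ed pd sfd, c, segs) dtm =
         (mkD (if ss = "" then pvDget dtm "date_value" else ss) se sts ste rd ed pd sfd, c, segs) from by
           show (if pvDget dtm "date_qualifier" = "232" then _ else _) = _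
           rw [if_neg h1, if_neg h2, if_pos h3]
           rw [upd_ss]
           ]
      rw [ih]
      rw [fd_cons_mem dtm rest ["232", "150", "472"] (by simp [h3]),
        fd_cons_not_mem dtm rest ["233", "151"] (by simp [h3]),
        fd_cons_not_mem dtm rest ["434"] (by simp [h3]),
        fd_cons_not_mem dtm rest ["435"] (by simp [h3]),
        fd_cons_not_mem dtm rest ["050"] (by simp [h3]),
        fd_cons_not_mem dtm rest ["036"] (by simp [h3]),
        fd_cons_not_mem dtm rest ["009"] (by simp [h3])]
      rw [ov_step]
    by_cases h4 : pvDget dtm "date_qualifier" = "151"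
    · rw [show pvStepA (mkD ss se sts ste rd ed pd sfd, c, segs) dtm =
         (mkD ss (if se = "" then pvDget dtm "date_value" else se) sts ste rd ed pd sfd, c, segs) from by
           show (if pvDget dtm "date_qualifier" = "232" then _ else _) = _
           rw [if_neg h1, if_neg h2, if_neg h3, if_pos h4]
           rw [upd_se]
           ]
      rw [ih]
      rw [fd_cons_not_mem dtm rest ["232", "150", "472"] (by simp [h4]),
        fd_cons_mem dtm rest ["233", "151"] (by simp [h4]),
        fd_cons_not_mem dtm rest ["434"] (by simp [h4]),
        fd_cons_not_mem dtm rest ["435"] (by simp [h4]),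
        fd_cons_not_mem dtm rest ["050"] (by simp [h4]),
        fd_cons_not_mem dtm rest ["036"] (by simp [h4]),
        fd_cons_not_mem dtm rest ["009"] (by simp [h4])]
      rw [ov_step]
    by_cases h5 : pvDget dtm "date_qualifier" = "472"
    · rw [show pvStepA (mkD ss se sts ste rd ed pd sfd, c, segs) dtm =
         (mkD (if ss = "" then pvDget dtm "date_value" else ss) se sts ste rd ed pd sfd, c, segs) from by
           show (if pvDget dtm "date_qualifier" = "232" then _ else _) = _
           rw [if_neg h1, if_neg h2, if_neg h3, if_neg h4, if_pos h5]
           rw [upd_ss]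
           ]
      rw [ih]
      rw [fd_cons_mem dtm rest ["232", "150", "472"] (by simp [h5]),
        fd_cons_not_mem dtm rest ["233", "151"] (by simp [h5]),
        fd_cons_not_mem dtm rest ["434"] (by simp [h5]),
        fd_cons_not_mem dtm rest ["435"] (by simp [h5]),
        fd_cons_not_mem dtm rest ["050"] (by simp [h5]),
        fd_cons_not_mem dtm rest ["036"] (by simp [h5]),
        fd_cons_not_mem dtm rest ["009"] (by simp [h5])]
      rw [ov_step]
    by_cases h6 : pvDget dtm "date_qualifier" = "050"
    · rw [show pvStepA (mkD ss se sts ste rd ed pd sfd, c, segs) dtm =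
         (mkD ss se sts ste (if rd = "" then pvDget dtm "date_value" else rd) ed pd sfd, c + 1, segs ++ ["DTM*050*" ++ pvDget dtm "date_value"]) from by
           show (if pvDget dtm "date_qualifier" = "232" then _ else _) = _
           rw [if_neg h1, if_neg h2, if_neg h3, if_neg h4, if_neg h5, if_pos h6]
           rw [upd_rd]
           ]
      rw [ih]
      rw [fd_cons_not_mem dtm rest ["232", "150", "472"] (by simp [h6]),
        fd_cons_not_mem dtm rest ["233", "151"] (by simp [h6]),
        fd_cons_not_mem dtm rest ["434"] (by simp [h6]),
        fd_cons_not_mem dtm rest ["435"] (by simp [h6]),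
        fd_cons_mem dtm rest ["050"] (by simp [h6]),
        fd_cons_not_mem dtm rest ["036"] (by simp [h6]),
        fd_cons_not_mem dtm rest ["009"] (by simp [h6])]
      rw [ov_step]
    by_cases h7 : pvDget dtm "date_qualifier" = "036"
    · rw [show pvStepA (mkD ss se sts ste rd ed pd sfd, c, segs) dtm =
         (mkD ss se sts ste rd (if ed = "" then pvDget dtm "date_value" else ed) pd sfd, c, segs) from by
           show (if pvDget dtm "date_qualifier" = "232" then _ else _) = _
           rw [if_neg h1, if_neg h2, if_neg h3, if_neg h4, if_neg h5, if_neg h6, if_pos h7]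
           rw [upd_ed]
           ]
      rw [ih]
      rw [fd_cons_not_mem dtm rest ["232", "150", "472"] (by simp [h7]),
        fd_cons_not_mem dtm rest ["233", "151"] (by simp [h7]),
        fd_cons_not_mem dtm rest ["434"] (by simp [h7]),
        fd_cons_not_mem dtm rest ["435"] (by simp [h7]),
        fd_cons_not_mem dtm rest ["050"] (by simp [h7]),
        fd_cons_mem dtm rest ["036"] (by simp [h7]),
        fd_cons_not_mem dtm rest ["009"] (by simp [h7])]
      rw [ov_step]
    by_cases h8 : pvDget dtm "date_qualifier" = "009"
    · rw [show pvStepA (mkD ss se sts ste rd ed pd sfd, c, segs) dtm =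
         (mkD ss se sts ste rd ed (if pd = "" then pvDget dtm "date_value" else pd) sfd, c, segs) from by
           show (if pvDget dtm "date_qualifier" = "232" then _ else _) = _
           rw [if_neg h1, if_neg h2, if_neg h3, if_neg h4, if_neg h5, if_neg h6, if_neg h7, if_pos h8]
           rw [upd_pd]
           ]
      rw [ih]
      rw [fd_cons_not_mem dtm rest ["232", "150", "472"] (by simp [h8]),
        fd_cons_not_mem dtm rest ["233", "151"] (by simp [h8]),
        fd_cons_not_mem dtm rest ["434"] (by simp [h8]),
        fd_cons_not_mem dtm rest ["435"] (by simp [h8]),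
        fd_cons_not_mem dtm rest ["050"] (by simp [h8]),
        fd_cons_not_mem dtm rest ["036"] (by simp [h8]),
        fd_cons_mem dtm rest ["009"] (by simp [h8])]
      rw [ov_step]
    by_cases h9 : pvDget dtm "date_qualifier" = "096"
    · rw [show pvStepA (mkD ss se sts ste rd ed pd sfd, c, segs) dtm =
         (mkD ss se sts ste rd ed pd sfd, c, segs) from by
           show (if pvDget dtm "date_qualifier" = "232" then _ else _) = _
           rw [if_neg h1, if_neg h2, if_neg h3, if_neg h4, if_neg h5, if_neg h6, if_neg h7, if_neg h8, if_pos h9]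
           ]
      rw [ih]
      rw [fd_cons_not_mem dtm rest ["232", "150", "472"] (by simp [h9]),
        fd_cons_not_mem dtm rest ["233", "151"] (by simp [h9]),
        fd_cons_not_mem dtm rest ["434"] (by simp [h9]),
        fd_cons_not_mem dtm rest ["435"] (by simp [h9]),
        fd_cons_not_mem dtm rest ["050"] (by simp [h9]),
        fd_cons_not_mem dtm rest ["036"] (by simp [h9]),
        fd_cons_not_mem dtm rest ["009"] (by simp [h9])]
    by_cases h10 : pvDget dtm "date_qualifier" = "434"
    · rw [show pvStepA (mkD ss se sts ste rd ed pd sfd, c, segs) dtm =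
         (mkD ss se (if sts = "" then pvDget dtm "date_value" else sts) ste rd ed pd (if sfd = "" then pvDget dtm "date_value" else sfd), c, segs) from by
           show (if pvDget dtm "date_qualifier" = "232" then _ else _) = _
           rw [if_neg h1, if_neg h2, if_neg h3, if_neg h4, if_neg h5, if_neg h6, if_neg h7, if_neg h8, if_neg h9, if_pos h10]
           rw [upd_sts, upd_sfd]
           ]
      rw [ih]
      rw [fd_cons_not_mem dtm rest ["232", "150", "472"] (by simp [h10]),
        fd_cons_not_mem dtm rest ["233", "151"] (by simp [h10]),
        fd_cons_mem dtm rest ["434"] (by simp [h10]),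
        fd_cons_not_mem dtm rest ["435"] (by simp [h10]),
        fd_cons_not_mem dtm rest ["050"] (by simp [h10]),
        fd_cons_not_mem dtm rest ["036"] (by simp [h10]),
        fd_cons_not_mem dtm rest ["009"] (by simp [h10])]
      rw [ov_step, ov_step]
    by_cases h11 : pvDget dtm "date_qualifier" = "435"
    · rw [show pvStepA (mkD ss se sts ste rd ed pd sfd, c, segs) dtm =
         (mkD ss se sts (if ste = "" then pvDget dtm "date_value" else ste) rd ed pd sfd, c, segs) from by
           show (if pvDget dtm "date_qualifier" = "232" then _ else _) = _
           rw [if_neg h1, if_neg h2, if_neg h3, if_neg h4, if_neg h5, if_neg h6, if_neg h7, if_neg h8, if_neg h9, if_neg h10, if_pos h11]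
           rw [upd_ste]
           ]
      rw [ih]
      rw [fd_cons_not_mem dtm rest ["232", "150", "472"] (by simp [h11]),
        fd_cons_not_mem dtm rest ["233", "151"] (by simp [h11]),
        fd_cons_not_mem dtm rest ["434"] (by simp [h11]),
        fd_cons_mem dtm rest ["435"] (by simp [h11]),
        fd_cons_not_mem dtm rest ["050"] (by simp [h11]),
        fd_cons_not_mem dtm rest ["036"] (by simp [h11]),
        fd_cons_not_mem dtm rest ["009"] (by simp [h11])]
      rw [ov_step]
    rw [show pvStepA (mkD ss se sts ste rd ed pd sfd, c, segs) dtm =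
       (mkD ss se sts ste rd ed pd sfd, c, segs) from by
         show (if pvDget dtm "date_qualifier" = "232" then _ else _) = _
         rw [if_neg h1, if_neg h2, if_neg h3, if_neg h4, if_neg h5, if_neg h6, if_neg h7, if_neg h8, if_neg h9, if_neg h10, if_neg h11]]
    rw [ih]
    rw [fd_cons_not_mem dtm rest ["232", "150", "472"] (by simp [h1, h3, h5]),
      fd_cons_not_mem dtm rest ["233", "151"] (by simp [h2, h4]),
      fd_cons_not_mem dtm rest ["434"] (by simp [h10]),
      fd_cons_not_mem dtm rest ["435"] (by simp [h11]),
      fd_cons_not_mem dtm rest ["050"] (by simp [h6]),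
      fd_cons_not_mem dtm rest ["036"] (by simp [h7]),
      fd_cons_not_mem dtm rest ["009"] (by simp [h8])]

-- ===== VERDICT =====
theorem extract_dtm_values_spec : Claim_equal_extract_dtm_values := by
  intro l _
  show extract_dtm_values l = extract_dtm_values_alt l
  unfold extract_dtm_values extract_dtm_values_alt
  have h0 : pvInitA = mkD "" "" "" "" "" "" "" "" := rfl
  rw [h0, pvMain]
  simp [ov, mkD]
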